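-- pv_equiv track=rewrite | github.com/bkgsur/Algo | final/design.py | zigzagiterator
-- ===== SOURCE A (Python) =====
-- def zigzagiterator(A: [[]]) -> []:
--     index: int = 0
--     i: int = 0
--     output: [int] = []
--     totalelements = 0
--     while True:
--         totalelements = 0
--         for l in A:
--             totalelements += len(l)
--             if i < len(l):
--                 output.append(l[i])
--             index += 1
--         i += 1
--         if len(output) == totalelements:
--             break
--
--     return output
-- ===== SOURCE B (Python) =====
-- def zigzagiterator(A: [[]]) -> []:
--     # Round-robin over only the still-nonempty lists: each pass emits the
--     # current head of every active list and keeps its tail only if nonempty.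
--     output = []
--     active = [l for l in A if l]
--     while active:
--         nxt = []
--         for l in active:
--             output.append(l[0])
--             if len(l) > 1:
--                 nxt.append(l[1:])
--         active = nxt
--     return output
-- ===== Notes on version B (the rewrite author's own statement) =====
-- stated objective: alternative
-- what changed: Instead of rescanning every list each round and stopping only when a running total-element count matches the output length, B keeps a shrinking worklist of still-nonempty lists, emits their heads each pass and drops exhausted lists, terminating when the worklist is empty.
import Mathlib
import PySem

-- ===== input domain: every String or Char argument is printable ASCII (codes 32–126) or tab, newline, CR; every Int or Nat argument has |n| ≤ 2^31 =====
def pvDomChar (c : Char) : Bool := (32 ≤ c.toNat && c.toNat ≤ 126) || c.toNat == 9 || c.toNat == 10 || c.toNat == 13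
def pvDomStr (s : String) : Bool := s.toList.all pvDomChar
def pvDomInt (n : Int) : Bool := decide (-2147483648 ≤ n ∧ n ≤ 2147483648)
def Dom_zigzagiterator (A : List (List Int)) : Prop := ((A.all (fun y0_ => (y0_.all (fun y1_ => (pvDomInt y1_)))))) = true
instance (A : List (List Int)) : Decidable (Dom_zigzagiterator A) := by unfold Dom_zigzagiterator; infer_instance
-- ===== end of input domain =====

-- B replaces A's repeated full rescan of all lists (stopped by a total-element count)
-- with a shrinking worklist of still-nonempty lists; objective: alternative (same result, different traversal).

-- ===== PORT A =====
-- one pass of the `for l in A` body: accumulate totalelements and append l[i] when i < len(l)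
-- (the Python variable `index` is incremented but never read, so it is not carried)
def zigzagRound (A : List (List Int)) (i : Nat) (state : Nat × List Int) : Nat × List Int :=
  A.foldl (fun st l =>
    (st.1 + l.length, if i < l.length then st.2 ++ [l.getD i 0] else st.2)) state

-- the `while True` loop; fuel is a totality guard only, chosen large enough to be unreachable
def zigzagLoop (fuel : Nat) (A : List (List Int)) (i : Nat) (output : List Int) : List Int :=
  match fuel with
  | 0 => output
  | fuel+1 =>
    let st := zigzagRound A i (0, output)
    if st.2.length == st.1 then st.2 else zigzagLoop fuel A (i+1) st.2

def zigzagiterator (A : List (List Int)) : List Int :=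
  zigzagLoop ((A.map List.length).foldl Nat.max 0 + 1) A 0 []

-- ===== PORT B =====
-- one pass of `for l in active`: emit l[0], keep l[1:] when it is nonempty
def zigzagAltStep (active : List (List Int)) (st : List Int × List (List Int)) :
    List Int × List (List Int) :=
  active.foldl (fun st l =>
    (st.1 ++ [l.headD 0], if 1 < l.length then st.2 ++ [l.drop 1] else st.2)) st

-- the `while active` loop; fuel is a totality guard only, chosen large enough to be unreachable
def zigzagAltLoop (fuel : Nat) (active : List (List Int)) (output : List Int) : List Int :=
  match fuel with
  | 0 => output
  | fuel+1 =>
    if active.isEmpty then output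
    else
      let st := zigzagAltStep active (output, [])
      zigzagAltLoop fuel st.2 st.1

def zigzagiterator_alt (A : List (List Int)) : List Int :=
  zigzagAltLoop ((A.map List.length).sum + 1) (A.filter (fun l => !l.isEmpty)) []

-- ===== PRECONDITION & SPEC =====
def Spec_zigzagiterator (A : List (List Int)) (out : List Int) : Prop := out = zigzagiterator_alt A
instance (A : List (List Int)) (out : List Int) : Decidable (Spec_zigzagiterator A out) := by unfold Spec_zigzagiterator; infer_instance

-- ===== CLAIM (what is proved, stated in full; the proofs are below) =====
def Claim_equal_zigzagiterator : Prop := ∀ (A : List (List Int)), Dom_zigzagiterator A → Spec_zigzagiterator A (zigzagiterator A)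

-- ===== LEMMAS AND PROOFS =====

-- column i of A (the elements appended in round i), the max length, and the first j columns
def pvCol (A : List (List Int)) (i : Nat) : List Int := A.filterMap (fun l => l[i]?)
def pvM (A : List (List Int)) : Nat := (A.map List.length).foldl Nat.max 0
def pvFlat (A : List (List Int)) (j : Nat) : List Int := ((List.range j).map (pvCol A)).flatten
def pvActive (A : List (List Int)) (i : Nat) : List (List Int) :=
  (A.map (fun l => l.drop i)).filter (fun l => !l.isEmpty)

theorem pvRound_eq (A : List (List Int)) (i : Nat) : ∀ (t : Nat) (out : List Int),
    zigzagRound A i (t, out) = (t + (A.map List.length).sum, out ++ pvCol A i) := by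
  induction A with
  | nil => intro t out; simp [zigzagRound, pvCol]
  | cons l A ih =>
    intro t out
    simp only [zigzagRound, List.foldl_cons] at *
    by_cases h : i < l.length
    · rw [show (if i < l.length then out ++ [l.getD i 0] else out) = out ++ [l.getD i 0] by simp [h]]
      rw [ih]
      simp [pvCol, List.filterMap_cons, List.getElem?_eq_getElem h, List.getD_eq_getElem?_getD,
        Nat.add_assoc, Nat.add_comm l.length]
    · rw [show (if i < l.length then out ++ [l.getD i 0] else out) = out by simp [h]]
      rw [ih]
      simp [pvCol, List.filterMap_cons, List.getElem?_eq_none (by omega : l.length ≤ i),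
        Nat.add_assoc, Nat.add_comm l.length]

theorem pvColLen (A : List (List Int)) (i : Nat) :
    (pvCol A i).length = A.countP (fun l => decide (i < l.length)) := by
  induction A with
  | nil => simp [pvCol]
  | cons l A ih =>
    by_cases h : i < l.length
    · simp [pvCol, List.filterMap_cons, List.getElem?_eq_getElem h, List.countP_cons, h] at *
      omega
    · simp [pvCol, List.filterMap_cons, List.getElem?_eq_none (by omega : l.length ≤ i),
        List.countP_cons, h] at *
      omega

theorem pvSumMin_succ (A : List (List Int)) (i : Nat) :
    (A.map (fun l => min l.length (i+1))).sum
      = (A.map (fun l => min l.length i)).sum + A.countP (fun l => decide (i < l.length)) := by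
  induction A with
  | nil => simp
  | cons l A ih =>
    by_cases h : i < l.length <;> simp [List.countP_cons, h, ih] <;> omega

theorem pvFlatLen (A : List (List Int)) : ∀ j,
    (pvFlat A j).length = (A.map (fun l => min l.length j)).sum := by
  intro j
  induction j with
  | zero => simp [pvFlat]
  | succ j ih =>
    simp only [pvFlat, List.range_succ, List.map_append, List.flatten_append] at *
    simp [ih, pvColLen, pvSumMin_succ]

theorem pvSumMin_le (A : List (List Int)) (j : Nat) :
    (A.map (fun l => min l.length j)).sum ≤ (A.map List.length).sum := by
  induction A with
  | nil => simp
  | cons l A ih => simp; omega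

theorem pvSumMin_eq_iff (A : List (List Int)) (j : Nat) :
    (A.map (fun l => min l.length j)).sum = (A.map List.length).sum
      ↔ ∀ l ∈ A, l.length ≤ j := by
  induction A with
  | nil => simp
  | cons l A ih =>
    have := pvSumMin_le A j
    simp only [List.map_cons, List.sum_cons, List.mem_cons]
    constructor
    · intro h
      have h1 : min l.length j = l.length ∧
          (A.map (fun l => min l.length j)).sum = (A.map List.length).sum := by omega
      refine fun x hx => hx.elim (fun e => e ▸ by omega) (fun hm => (ih.mp h1.2) x hm)
    · intro h
      have h1 : l.length ≤ j := h l (Or.inl rfl)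
      have h2 := ih.mpr (fun x hx => h x (Or.inr hx))
      omega

theorem pvFoldlMax_le (ls : List Nat) : ∀ (init j : Nat),
    (ls.foldl Nat.max init ≤ j ↔ init ≤ j ∧ ∀ x ∈ ls, x ≤ j) := by
  induction ls with
  | nil => simp
  | cons a ls ih =>
    intro init j
    simp only [List.foldl_cons, ih, Nat.max_le, List.mem_cons]
    constructor
    · rintro ⟨⟨h1, h2⟩, h3⟩
      exact ⟨h1, fun x hx => hx.elim (fun e => e ▸ h2) (h3 x)⟩
    · rintro ⟨h1, h2⟩
      exact ⟨⟨h1, h2 a (Or.inl rfl)⟩, fun x hx => h2 x (Or.inr hx)⟩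

theorem pvM_le_iff (A : List (List Int)) (j : Nat) :
    pvM A ≤ j ↔ ∀ l ∈ A, l.length ≤ j := by
  unfold pvM
  rw [pvFoldlMax_le]
  simp

theorem pvCol_nil (A : List (List Int)) (j : Nat) (h : pvM A ≤ j) : pvCol A j = [] := by
  rw [pvCol, List.filterMap_eq_nil_iff]
  intro l hl
  simp [List.getElem?_eq_none ((pvM_le_iff A j).mp h l hl)]

theorem pvFlat_stable (A : List (List Int)) : ∀ j, pvM A ≤ j → pvFlat A j = pvFlat A (pvM A) := by
  intro j hj
  induction j, hj using Nat.le_induction with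
  | base => rfl
  | succ j hj ih =>
    simp only [pvFlat, List.range_succ, List.map_append, List.flatten_append] at *
    simp [pvCol_nil A j hj, ih]

theorem pvLemA (A : List (List Int)) : ∀ (fuel i : Nat),
    max (pvM A) 1 ≤ i + fuel → i < max (pvM A) 1 →
    zigzagLoop fuel A i (pvFlat A i) = pvFlat A (pvM A) := by
  intro fuel
  induction fuel with
  | zero => intro i h1 h2; omega
  | succ fuel ih =>
    intro i h1 h2
    simp only [zigzagLoop, pvRound_eq, Nat.zero_add]
    have hflat : pvFlat A i ++ pvCol A i = pvFlat A (i+1) := by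
      simp [pvFlat, List.range_succ]
    rw [hflat]
    by_cases hbr : pvM A ≤ i + 1
    · have : (pvFlat A (i+1)).length = (A.map List.length).sum := by
        rw [pvFlatLen, pvSumMin_eq_iff]
        exact (pvM_le_iff A (i+1)).mp hbr
      simp only [this, beq_self_eq_true, if_true]
      exact pvFlat_stable A (i+1) hbr
    · have hne : ¬ ((pvFlat A (i+1)).length = (A.map List.length).sum) := by
        rw [pvFlatLen, pvSumMin_eq_iff]
        intro h
        exact hbr ((pvM_le_iff A (i+1)).mpr h)
      simp only [beq_iff_eq, hne, if_false]
      exact ih (i+1) (by omega) (by omega)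

theorem pvStep_eq (active : List (List Int)) : ∀ (out : List Int) (acc : List (List Int)),
    zigzagAltStep active (out, acc)
      = (out ++ active.map (fun l => l.headD 0),
         acc ++ active.filterMap (fun l => if 1 < l.length then some (l.drop 1) else none)) := by
  induction active with
  | nil => intro out acc; simp [zigzagAltStep]
  | cons l active ih =>
    intro out acc
    simp only [zigzagAltStep, List.foldl_cons] at *
    by_cases h : 1 < l.length
    · rw [if_pos h, ih]
      simp [List.filterMap_cons, h]
    · rw [if_neg h, ih]
      simp [List.filterMap_cons, h]

theorem pvActive_heads (A : List (List Int)) (i : Nat) :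
    (pvActive A i).map (fun l => l.headD 0) = pvCol A i := by
  induction A with
  | nil => simp [pvActive, pvCol]
  | cons l A ih =>
    by_cases h : i < l.length
    · have hne : (l.drop i).isEmpty = false := by
        simp [List.isEmpty_iff]; omega
      simp only [pvActive, pvCol, List.map_cons, List.filter_cons, hne, Bool.not_false,
        if_true, List.map_cons, List.filterMap_cons, List.getElem?_eq_getElem h]
      rw [show (l.drop i).headD 0 = (l.drop i).head?.getD 0 by simp [List.headD_eq_head?_getD]]
      rw [List.head?_drop]
      simp only [List.getElem?_eq_getElem h, Option.getD_some]
      exact congrArg _ ih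
    · have he : (l.drop i).isEmpty = true := by
        simp [List.isEmpty_iff, List.drop_eq_nil_iff]; omega
      simp only [pvActive, pvCol, List.map_cons, List.filter_cons, he, Bool.not_true, if_false,
        List.filterMap_cons, List.getElem?_eq_none (by omega : l.length ≤ i)]
      exact ih

theorem pvActive_next (A : List (List Int)) (i : Nat) :
    (pvActive A i).filterMap (fun l => if 1 < l.length then some (l.drop 1) else none)
      = pvActive A (i+1) := by
  induction A with
  | nil => simp [pvActive]
  | cons l A ih =>
    have hdd : (l.drop i).drop 1 = l.drop (i+1) := by
      rw [List.drop_drop]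
    by_cases h : i + 1 < l.length
    · have h1 : (l.drop i).isEmpty = false := by simp [List.isEmpty_iff]; omega
      have h2 : 1 < (l.drop i).length := by simp; omega
      have h3 : (l.drop (i+1)).isEmpty = false := by simp [List.isEmpty_iff]; omega
      simp only [pvActive, List.map_cons, List.filter_cons, h1, h3, Bool.not_false, if_true,
        List.filterMap_cons, h2, if_pos h2, hdd]
      exact congrArg _ ih
    · have h3 : (l.drop (i+1)).isEmpty = true := by
        simp [List.isEmpty_iff, List.drop_eq_nil_iff]; omega
      by_cases hi : i < l.length
      · have h1 : (l.drop i).isEmpty = false := by simp [List.isEmpty_iff]; omega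
        have h2 : ¬ 1 < (l.drop i).length := by simp; omega
        simp only [pvActive, List.map_cons, List.filter_cons, h1, h3, Bool.not_false,
          Bool.not_true, if_true, if_false, List.filterMap_cons, if_neg h2]
        exact ih
      · have h1 : (l.drop i).isEmpty = true := by
          simp [List.isEmpty_iff, List.drop_eq_nil_iff]; omega
        simp only [pvActive, List.map_cons, List.filter_cons, h1, h3, Bool.not_true, if_false]
        exact ih

theorem pvActive_empty_iff (A : List (List Int)) (i : Nat) :
    (pvActive A i).isEmpty = true ↔ pvM A ≤ i := by
  rw [pvM_le_iff]
  simp only [pvActive, List.isEmpty_iff, List.filter_eq_nil_iff, List.mem_map]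
  constructor
  · intro h l hl
    have := h (l.drop i) ⟨l, hl, rfl⟩
    simp [List.isEmpty_iff, List.drop_eq_nil_iff] at this
    omega
  · rintro h x ⟨l, hl, rfl⟩
    simp [List.isEmpty_iff, List.drop_eq_nil_iff]
    exact h l hl

theorem pvLemB (A : List (List Int)) : ∀ (fuel i : Nat) (out : List Int),
    pvM A ≤ i + fuel →
    zigzagAltLoop fuel (pvActive A i) out
      = out ++ ((List.range' i (pvM A - i)).map (pvCol A)).flatten := by
  intro fuel
  induction fuel with
  | zero =>
    intro i out h
    have : pvM A - i = 0 := by omega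
    simp [zigzagAltLoop, this]
  | succ fuel ih =>
    intro i out h
    by_cases he : pvM A ≤ i
    · have : pvM A - i = 0 := by omega
      simp [zigzagAltLoop, (pvActive_empty_iff A i).mpr he, this]
    · have hne : (pvActive A i).isEmpty = false := by
        rcases Bool.eq_false_or_eq_true ((pvActive A i).isEmpty) with h' | h'
        · exact absurd ((pvActive_empty_iff A i).mp h') he
        · exact h'
      simp only [zigzagAltLoop, hne, Bool.false_eq_true, if_false]
      rw [pvStep_eq, pvActive_heads, pvActive_next]
      simp only [List.nil_append]
      rw [ih (i+1) (out ++ pvCol A i) (by omega)]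
      have hr : pvM A - i = (pvM A - (i+1)) + 1 := by omega
      rw [hr, List.range'_succ]
      simp

theorem pvA_closed (A : List (List Int)) : zigzagiterator A = pvFlat A (pvM A) := by
  have h0 : pvFlat A 0 = [] := by simp [pvFlat]
  rw [zigzagiterator, ← h0]
  exact pvLemA A (pvM A + 1) 0 (by unfold pvM; omega) (by omega)

theorem pvM_le_sum (A : List (List Int)) : pvM A ≤ (A.map List.length).sum := by
  rw [pvM_le_iff]
  intro l hl
  exact List.single_le_sum (fun x _ => Nat.zero_le x) _ (List.mem_map_of_mem hl)

theorem pvB_closed (A : List (List Int)) : zigzagiterator_alt A = pvFlat A (pvM A) := by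
  have hA0 : A.filter (fun l => !l.isEmpty) = pvActive A 0 := by
    simp [pvActive]
  rw [zigzagiterator_alt, hA0,
    pvLemB A ((A.map List.length).sum + 1) 0 [] (by have := pvM_le_sum A; omega)]
  simp [pvFlat, List.range_eq_range']

-- ===== VERDICT (by name: the statement is the Claim_ definition above) =====
theorem zigzagiterator_spec : Claim_equal_zigzagiterator := by
  intro A _
  unfold Spec_zigzagiterator
  rw [pvA_closed, pvB_closed]
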